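-- pv_equiv track=rewrite | github.com/dat-nguyenvn/DC12 | wildtracker/utils/window_detect.py | generate_tile_centers_border_and_salient
-- ===== SOURCE A (Python) =====
-- def generate_tile_centers_border_and_salient(frame_width, frame_height, tile_width=640, tile_height=640, overlap_width=10, overlap_height=0):
--     centers = []
--     border_centers = []
--     salient_centers = []
--
--     # Calculate the number of tiles needed along width and height
--     num_tiles_x = (frame_width + tile_width - overlap_width - 1) // (tile_width - overlap_width)
--     num_tiles_y = (frame_height + tile_height - overlap_height - 1) // (tile_height - overlap_height)
--
--     # Calculate actual step sizes (this will help distribute overlap in the center)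
--     step_x = (frame_width - tile_width) // (num_tiles_x - 1) if num_tiles_x > 1 else frame_width
--     step_y = (frame_height - tile_height) // (num_tiles_y - 1) if num_tiles_y > 1 else frame_height
--
--     # Calculate tile centers and categorize them
--     for j in range(num_tiles_y):
--         for i in range(num_tiles_x):
--             # Calculate the center of the tile
--             x_center = tile_width // 2 + i * step_x
--             y_center = tile_height // 2 + j * step_y
--             centers.append((x_center, y_center))
--
--             # Determine if the center is at an edge
--             if i == 0 or i == num_tiles_x - 1 or j == 0 or j == num_tiles_y - 1:
--                 border_centers.append((x_center, y_center))
--             else: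
--                 salient_centers.append((x_center, y_center))
--
--     return centers, border_centers, salient_centers
-- ===== SOURCE B (Python) =====
-- def generate_tile_centers_border_and_salient(frame_width, frame_height, tile_width=640, tile_height=640, overlap_width=10, overlap_height=0):
--     num_tiles_x = (frame_width + tile_width - overlap_width - 1) // (tile_width - overlap_width)
--     num_tiles_y = (frame_height + tile_height - overlap_height - 1) // (tile_height - overlap_height)
--     step_x = (frame_width - tile_width) // (num_tiles_x - 1) if num_tiles_x > 1 else frame_width
--     step_y = (frame_height - tile_height) // (num_tiles_y - 1) if num_tiles_y > 1 else frame_height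
--
--     def center(i, j):
--         return (tile_width // 2 + i * step_x, tile_height // 2 + j * step_y)
--
--     def row(j):
--         return [center(i, j) for i in range(num_tiles_x)]
--
--     centers = [c for j in range(num_tiles_y) for c in row(j)]
--
--     # Border built by ring construction (no per-tile edge test): full top row,
--     # the two side columns of each middle row, full bottom row; salient is the
--     # interior rectangle.
--     border_centers = row(0) if num_tiles_y >= 1 else []
--     salient_centers = []
--     for j in range(1, num_tiles_y - 1):
--         if num_tiles_x >= 1:
--             border_centers.append(center(0, j))
--         if num_tiles_x >= 2:
--             border_centers.append(center(num_tiles_x - 1, j))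
--         salient_centers.extend(center(i, j) for i in range(1, num_tiles_x - 1))
--     if num_tiles_y >= 2:
--         border_centers += row(num_tiles_y - 1)
--     return centers, border_centers, salient_centers
-- ===== Notes on version B (the rewrite author's own statement) =====
-- stated objective: alternative
-- what changed: Replaces A's per-tile edge test inside one interleaved nested loop by a ring construction: the border list is assembled directly as full top row + the two side columns of each middle row + full bottom row, and the salient list as the interior rectangle (ranges 1..n-2), with no classification test per tile; centers are built as concatenated rows.
import Mathlib
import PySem

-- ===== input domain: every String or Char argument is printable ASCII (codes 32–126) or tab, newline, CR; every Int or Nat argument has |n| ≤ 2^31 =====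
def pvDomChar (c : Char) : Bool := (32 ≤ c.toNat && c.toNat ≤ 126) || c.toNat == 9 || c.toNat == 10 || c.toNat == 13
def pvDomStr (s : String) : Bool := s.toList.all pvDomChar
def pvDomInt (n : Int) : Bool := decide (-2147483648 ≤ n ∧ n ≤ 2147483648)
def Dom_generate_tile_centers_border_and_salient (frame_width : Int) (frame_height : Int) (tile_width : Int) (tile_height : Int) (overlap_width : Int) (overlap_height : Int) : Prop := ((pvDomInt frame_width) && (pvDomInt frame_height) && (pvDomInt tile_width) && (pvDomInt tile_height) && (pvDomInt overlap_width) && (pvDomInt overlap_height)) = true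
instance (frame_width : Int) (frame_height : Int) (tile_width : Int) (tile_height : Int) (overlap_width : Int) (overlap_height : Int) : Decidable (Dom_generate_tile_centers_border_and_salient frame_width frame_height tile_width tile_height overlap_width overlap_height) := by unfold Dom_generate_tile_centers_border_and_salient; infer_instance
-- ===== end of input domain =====

-- B drops A's per-tile edge test: the border is assembled directly as a ring
-- (full top row, the two side columns of each middle row, full bottom row) and
-- the salient list as the interior rectangle; same cost, alternative structure.

-- ===== PORT A =====
-- shared formulas of both Pythons: num_tiles_* and step_* (verbatim expressions)
def pvNumTiles (frame tile overlap : Int) : Int :=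
  PySem.Int.floordiv (frame + tile - overlap - 1) (tile - overlap)
def pvStepSize (frame tile n : Int) : Int :=
  if n > 1 then PySem.Int.floordiv (frame - tile) (n - 1) else frame

def generate_tile_centers_border_and_salient (frame_width : Int) (frame_height : Int) (tile_width : Int) (tile_height : Int) (overlap_width : Int) (overlap_height : Int) : (List (Int × Int)) × (List (Int × Int)) × (List (Int × Int)) :=
  -- for j in range(num_tiles_y): for i in range(num_tiles_x): append / classify
  (PySem.List.pyRange 0 (pvNumTiles frame_height tile_height overlap_height) 1).foldl (fun acc j =>
    (PySem.List.pyRange 0 (pvNumTiles frame_width tile_width overlap_width) 1).foldl (fun acc i =>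
      let x_center := PySem.Int.floordiv tile_width 2 + i * pvStepSize frame_width tile_width (pvNumTiles frame_width tile_width overlap_width)
      let y_center := PySem.Int.floordiv tile_height 2 + j * pvStepSize frame_height tile_height (pvNumTiles frame_height tile_height overlap_height)
      let centers := acc.1 ++ [(x_center, y_center)]
      if i = 0 ∨ i = pvNumTiles frame_width tile_width overlap_width - 1 ∨ j = 0 ∨ j = pvNumTiles frame_height tile_height overlap_height - 1 then
        (centers, acc.2.1 ++ [(x_center, y_center)], acc.2.2)
      else
        (centers, acc.2.1, acc.2.2 ++ [(x_center, y_center)])) acc)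
    ([], [], [])

-- ===== PORT B =====
def generate_tile_centers_border_and_salient_alt (frame_width : Int) (frame_height : Int) (tile_width : Int) (tile_height : Int) (overlap_width : Int) (overlap_height : Int) : (List (Int × Int)) × (List (Int × Int)) × (List (Int × Int)) :=
  let nx := pvNumTiles frame_width tile_width overlap_width
  let ny := pvNumTiles frame_height tile_height overlap_height
  let sx := pvStepSize frame_width tile_width nx
  let sy := pvStepSize frame_height tile_height ny
  let center := fun (i j : Int) =>
    (PySem.Int.floordiv tile_width 2 + i * sx, PySem.Int.floordiv tile_height 2 + j * sy)
  let row := fun (j : Int) => (PySem.List.pyRange 0 nx 1).map (fun i => center i j)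
  let centers := (PySem.List.pyRange 0 ny 1).flatMap (fun j => row j)
  -- ring construction: top row, then the middle-row loop, then bottom row
  let bs := (PySem.List.pyRange 1 (ny - 1) 1).foldl (fun acc j =>
      let b1 := if nx ≥ 1 then acc.1 ++ [center 0 j] else acc.1
      let b2 := if nx ≥ 2 then b1 ++ [center (nx - 1) j] else b1
      (b2, acc.2 ++ (PySem.List.pyRange 1 (nx - 1) 1).map (fun i => center i j)))
    ((if ny ≥ 1 then row 0 else []), ([] : List (Int × Int)))
  let border := if ny ≥ 2 then bs.1 ++ row (ny - 1) else bs.1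
  (centers, border, bs.2)

-- ===== PRECONDITION & SPEC =====
-- Pre_ excludes exactly the inputs where the Python raises ZeroDivisionError
-- (tile_width == overlap_width or tile_height == overlap_height).
def Pre_generate_tile_centers_border_and_salient (frame_width : Int) (frame_height : Int) (tile_width : Int) (tile_height : Int) (overlap_width : Int) (overlap_height : Int) : Prop :=
  tile_width - overlap_width ≠ 0 ∧ tile_height - overlap_height ≠ 0
instance (frame_width : Int) (frame_height : Int) (tile_width : Int) (tile_height : Int) (overlap_width : Int) (overlap_height : Int) : Decidable (Pre_generate_tile_centers_border_and_salient frame_width frame_height tile_width tile_height overlap_width overlap_height) := by unfold Pre_generate_tile_centers_border_and_salient; infer_instance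
def pvWitness_generate_tile_centers_border_and_salient : Int × Int × Int × Int × Int × Int := (1280, 720, 640, 640, 10, 0)

def Spec_generate_tile_centers_border_and_salient (frame_width : Int) (frame_height : Int) (tile_width : Int) (tile_height : Int) (overlap_width : Int) (overlap_height : Int) (out : (List (Int × Int)) × (List (Int × Int)) × (List (Int × Int))) : Prop := out = generate_tile_centers_border_and_salient_alt frame_width frame_height tile_width tile_height overlap_width overlap_height
instance (frame_width : Int) (frame_height : Int) (tile_width : Int) (tile_height : Int) (overlap_width : Int) (overlap_height : Int) (out : (List (Int × Int)) × (List (Int × Int)) × (List (Int × Int))) : Decidable (Spec_generate_tile_centers_border_and_salient frame_width frame_height tile_width tile_height overlap_width overlap_height out) := by unfold Spec_generate_tile_centers_border_and_salient; infer_instance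

-- ===== CLAIM (what is proved, stated in full; the proofs are below) =====
def Claim_equal_generate_tile_centers_border_and_salient : Prop := ∀ (frame_width : Int) (frame_height : Int) (tile_width : Int) (tile_height : Int) (overlap_width : Int) (overlap_height : Int), Dom_generate_tile_centers_border_and_salient frame_width frame_height tile_width tile_height overlap_width overlap_height → Pre_generate_tile_centers_border_and_salient frame_width frame_height tile_width tile_height overlap_width overlap_height → Spec_generate_tile_centers_border_and_salient frame_width frame_height tile_width tile_height overlap_width overlap_height (generate_tile_centers_border_and_salient frame_width frame_height tile_width tile_height overlap_width overlap_height)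

-- ===== LEMMAS AND PROOFS =====

-- canonical pieces both ports are reduced to
def pvCenter (tw th sx sy i j : Int) : Int × Int :=
  (PySem.Int.floordiv tw 2 + i * sx, PySem.Int.floordiv th 2 + j * sy)
def pvEdge (nx ny i j : Int) : Bool := decide (i = 0 ∨ i = nx - 1 ∨ j = 0 ∨ j = ny - 1)
def pvRowC (tw th sx sy nx j : Int) : List (Int × Int) :=
  (PySem.List.pyRange 0 nx 1).map (fun i => pvCenter tw th sx sy i j)
def pvRowB (tw th sx sy nx ny j : Int) : List (Int × Int) :=
  ((PySem.List.pyRange 0 nx 1).filter (fun i => pvEdge nx ny i j)).map (fun i => pvCenter tw th sx sy i j)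
def pvRowS (tw th sx sy nx ny j : Int) : List (Int × Int) :=
  ((PySem.List.pyRange 0 nx 1).filter (fun i => !pvEdge nx ny i j)).map (fun i => pvCenter tw th sx sy i j)

-- A's inner loop over a row
theorem pvA_inner (tw th sx sy nx ny j : Int) (is : List Int)
    (acc : (List (Int × Int)) × (List (Int × Int)) × (List (Int × Int))) :
    (is.foldl (fun acc i =>
      let x_center := PySem.Int.floordiv tw 2 + i * sx
      let y_center := PySem.Int.floordiv th 2 + j * sy
      let centers := acc.1 ++ [(x_center, y_center)]
      if i = 0 ∨ i = nx - 1 ∨ j = 0 ∨ j = ny - 1 then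
        (centers, acc.2.1 ++ [(x_center, y_center)], acc.2.2)
      else
        (centers, acc.2.1, acc.2.2 ++ [(x_center, y_center)])) acc)
    = (acc.1 ++ is.map (fun i => pvCenter tw th sx sy i j),
       acc.2.1 ++ (is.filter (fun i => pvEdge nx ny i j)).map (fun i => pvCenter tw th sx sy i j),
       acc.2.2 ++ (is.filter (fun i => !pvEdge nx ny i j)).map (fun i => pvCenter tw th sx sy i j)) := by
  induction is generalizing acc with
  | nil => simp
  | cons i is ih =>
    simp only [List.foldl_cons]
    rw [ih]
    by_cases h : i = 0 ∨ i = nx - 1 ∨ j = 0 ∨ j = ny - 1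
    · have h' : ¬(¬i = 0 ∧ ¬i = nx - 1 ∧ ¬j = 0 ∧ ¬j = ny - 1) := by tauto
      simp [h, h', pvEdge, pvCenter, List.append_assoc]
    · have h' : ¬i = 0 ∧ ¬i = nx - 1 ∧ ¬j = 0 ∧ ¬j = ny - 1 := by tauto
      simp [h', pvEdge, pvCenter, List.append_assoc]

-- A's outer loop
theorem pvA_outer (tw th sx sy nx ny : Int) (js : List Int)
    (acc : (List (Int × Int)) × (List (Int × Int)) × (List (Int × Int))) :
    (js.foldl (fun acc j =>
      (PySem.List.pyRange 0 nx 1).foldl (fun acc i =>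
        let x_center := PySem.Int.floordiv tw 2 + i * sx
        let y_center := PySem.Int.floordiv th 2 + j * sy
        let centers := acc.1 ++ [(x_center, y_center)]
        if i = 0 ∨ i = nx - 1 ∨ j = 0 ∨ j = ny - 1 then
          (centers, acc.2.1 ++ [(x_center, y_center)], acc.2.2)
        else
          (centers, acc.2.1, acc.2.2 ++ [(x_center, y_center)])) acc) acc)
    = (acc.1 ++ js.flatMap (fun j => pvRowC tw th sx sy nx j),
       acc.2.1 ++ js.flatMap (fun j => pvRowB tw th sx sy nx ny j),
       acc.2.2 ++ js.flatMap (fun j => pvRowS tw th sx sy nx ny j)) := by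
  induction js generalizing acc with
  | nil => simp
  | cons j js ih =>
    simp only [List.foldl_cons]
    rw [pvA_inner, ih]
    simp [pvRowC, pvRowB, pvRowS, List.flatMap_cons, List.append_assoc]

-- flatMap congruence on members
theorem pvFlatMap_congr {α β : Type} (js : List α) (f g : α → List β)
    (h : ∀ j ∈ js, f j = g j) : js.flatMap f = js.flatMap g := by
  induction js with
  | nil => rfl
  | cons j js ih =>
    simp only [List.flatMap_cons]
    rw [h j (by simp), ih (fun x hx => h x (by simp [hx]))]

-- edge rows are whole rows, and contribute nothing salient
theorem pvRowB_edge (tw th sx sy nx ny j : Int) (h : j = 0 ∨ j = ny - 1) :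
    pvRowB tw th sx sy nx ny j = pvRowC tw th sx sy nx j := by
  unfold pvRowB pvRowC
  rw [List.filter_eq_self.mpr]
  intro i _
  simp [pvEdge]; tauto

theorem pvRowS_edge (tw th sx sy nx ny j : Int) (h : j = 0 ∨ j = ny - 1) :
    pvRowS tw th sx sy nx ny j = [] := by
  unfold pvRowS
  rw [List.filter_eq_nil_iff.mpr]
  · simp
  · intro i _
    simp [pvEdge]; tauto

-- middle rows: the border part is the two side columns …
theorem pvRowB_mid (tw th sx sy nx ny j : Int) (h0 : j ≠ 0) (h1 : j ≠ ny - 1) :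
    pvRowB tw th sx sy nx ny j
      = (if nx ≥ 1 then [pvCenter tw th sx sy 0 j] else [])
        ++ (if nx ≥ 2 then [pvCenter tw th sx sy (nx - 1) j] else []) := by
  unfold pvRowB
  by_cases hx0 : nx ≤ 0
  · rw [PySem.List.pyRange_one_eq_nil hx0]
    have g1 : ¬ nx ≥ 1 := by omega
    have g2 : ¬ nx ≥ 2 := by omega
    simp [g1, g2]
  · by_cases hx1 : nx = 1
    · subst hx1
      rw [show PySem.List.pyRange 0 1 1 = [0] from PySem.List.pyRange_one_singleton 0]
      simp [pvEdge]
    · have h2 : (2 : Int) ≤ nx := by omega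
      rw [PySem.List.pyRange_one_append 0 1 nx (by omega) (by omega),
          PySem.List.pyRange_one_append 1 (nx - 1) nx (by omega) (by omega),
          show PySem.List.pyRange 0 1 1 = [0] from PySem.List.pyRange_one_singleton 0,
          show PySem.List.pyRange (nx - 1) nx 1 = [nx - 1] by
            have := PySem.List.pyRange_one_singleton (nx - 1); simpa using this]
      have hmid : (PySem.List.pyRange 1 (nx - 1) 1).filter (fun i => pvEdge nx ny i j) = [] := by
        rw [List.filter_eq_nil_iff.mpr]
        intro i hi
        rw [PySem.List.mem_pyRange_one] at hi
        simp [pvEdge]; omega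
      simp only [List.filter_append, hmid, List.filter_cons, List.filter_nil]
      have e0 : pvEdge nx ny 0 j = true := by simp [pvEdge]
      have e1 : pvEdge nx ny (nx - 1) j = true := by simp [pvEdge]
      simp [e0, e1, h2, show (1:Int) ≤ nx by omega]

-- … and the salient part is the interior range
theorem pvRowS_mid (tw th sx sy nx ny j : Int) (h0 : j ≠ 0) (h1 : j ≠ ny - 1) :
    pvRowS tw th sx sy nx ny j
      = (PySem.List.pyRange 1 (nx - 1) 1).map (fun i => pvCenter tw th sx sy i j) := by
  unfold pvRowS
  by_cases hx0 : nx ≤ 0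
  · rw [PySem.List.pyRange_one_eq_nil hx0, PySem.List.pyRange_one_eq_nil (by omega)]
    simp
  · by_cases hx1 : nx = 1
    · subst hx1
      rw [show PySem.List.pyRange 0 1 1 = [0] from PySem.List.pyRange_one_singleton 0,
          PySem.List.pyRange_one_eq_nil (by omega)]
      simp [pvEdge]
    · have h2 : (2 : Int) ≤ nx := by omega
      rw [PySem.List.pyRange_one_append 0 1 nx (by omega) (by omega),
          PySem.List.pyRange_one_append 1 (nx - 1) nx (by omega) (by omega),
          show PySem.List.pyRange 0 1 1 = [0] from PySem.List.pyRange_one_singleton 0,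
          show PySem.List.pyRange (nx - 1) nx 1 = [nx - 1] by
            have := PySem.List.pyRange_one_singleton (nx - 1); simpa using this]
      have hmid : (PySem.List.pyRange 1 (nx - 1) 1).filter (fun i => !pvEdge nx ny i j)
          = PySem.List.pyRange 1 (nx - 1) 1 := by
        rw [List.filter_eq_self.mpr]
        intro i hi
        rw [PySem.List.mem_pyRange_one] at hi
        simp [pvEdge]; omega
      have e0 : pvEdge nx ny 0 j = true := by simp [pvEdge]
      have e1 : pvEdge nx ny (nx - 1) j = true := by simp [pvEdge]
      simp only [List.filter_append, hmid, List.filter_cons, List.filter_nil, e0]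
      simp [e1]

-- B's middle-row fold, reduced to two flatMaps
theorem pvB_fold (c : Int → Int → Int × Int) (nx : Int) (js : List Int)
    (acc : (List (Int × Int)) × (List (Int × Int))) :
    (js.foldl (fun acc j =>
      let b1 := if nx ≥ 1 then acc.1 ++ [c 0 j] else acc.1
      let b2 := if nx ≥ 2 then b1 ++ [c (nx - 1) j] else b1
      (b2, acc.2 ++ (PySem.List.pyRange 1 (nx - 1) 1).map (fun i => c i j))) acc)
    = (acc.1 ++ js.flatMap (fun j =>
         (if nx ≥ 1 then [c 0 j] else []) ++ (if nx ≥ 2 then [c (nx - 1) j] else [])),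
       acc.2 ++ js.flatMap (fun j => (PySem.List.pyRange 1 (nx - 1) 1).map (fun i => c i j))) := by
  induction js generalizing acc with
  | nil => simp
  | cons j js ih =>
    simp only [List.foldl_cons]
    rw [ih]
    split_ifs with h1 h2 h2 <;> simp [List.flatMap_cons, List.append_assoc]

-- the border ring equals the filtered rows, row by row
theorem pvBorder_eq (tw th sx sy nx ny : Int) :
    (PySem.List.pyRange 0 ny 1).flatMap (fun j => pvRowB tw th sx sy nx ny j)
      = (if ny ≥ 1 then pvRowC tw th sx sy nx 0 else [])
        ++ (PySem.List.pyRange 1 (ny - 1) 1).flatMap (fun j =>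
             (if nx ≥ 1 then [pvCenter tw th sx sy 0 j] else [])
             ++ (if nx ≥ 2 then [pvCenter tw th sx sy (nx - 1) j] else []))
        ++ (if ny ≥ 2 then pvRowC tw th sx sy nx (ny - 1) else []) := by
  have hmid : (PySem.List.pyRange 1 (ny - 1) 1).flatMap (fun j => pvRowB tw th sx sy nx ny j)
      = (PySem.List.pyRange 1 (ny - 1) 1).flatMap (fun j =>
          (if nx ≥ 1 then [pvCenter tw th sx sy 0 j] else [])
          ++ (if nx ≥ 2 then [pvCenter tw th sx sy (nx - 1) j] else [])) := by
    apply pvFlatMap_congr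
    intro j hj
    rw [PySem.List.mem_pyRange_one] at hj
    exact pvRowB_mid tw th sx sy nx ny j (by omega) (by omega)
  by_cases hy0 : ny ≤ 0
  · have hmidnil : PySem.List.pyRange 1 (ny - 1) 1 = [] := PySem.List.pyRange_one_eq_nil (by omega)
    rw [PySem.List.pyRange_one_eq_nil hy0, hmidnil]
    have g1 : ¬ ny ≥ 1 := by omega
    have g2 : ¬ ny ≥ 2 := by omega
    simp [g1, g2]
  · by_cases hy1 : ny = 1
    · subst hy1
      have hmidnil : PySem.List.pyRange 1 (1 - 1) 1 = [] := PySem.List.pyRange_one_eq_nil (by omega)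
      rw [show PySem.List.pyRange 0 1 1 = [0] from PySem.List.pyRange_one_singleton 0, hmidnil]
      simp [pvRowB_edge tw th sx sy nx 1 0 (Or.inl rfl)]
    · have h2 : (2 : Int) ≤ ny := by omega
      rw [PySem.List.pyRange_one_append 0 1 ny (by omega) (by omega),
          PySem.List.pyRange_one_append 1 (ny - 1) ny (by omega) (by omega),
          show PySem.List.pyRange 0 1 1 = [0] from PySem.List.pyRange_one_singleton 0,
          show PySem.List.pyRange (ny - 1) ny 1 = [ny - 1] by
            have := PySem.List.pyRange_one_singleton (ny - 1); simpa using this]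
      simp only [List.flatMap_append, List.flatMap_cons, List.flatMap_nil, List.append_nil, hmid]
      rw [pvRowB_edge tw th sx sy nx ny 0 (Or.inl rfl),
          pvRowB_edge tw th sx sy nx ny (ny - 1) (Or.inr rfl)]
      simp [h2, show (1:Int) ≤ ny by omega, List.append_assoc]

-- the salient rectangle equals the filtered rows, row by row
theorem pvSalient_eq (tw th sx sy nx ny : Int) :
    (PySem.List.pyRange 0 ny 1).flatMap (fun j => pvRowS tw th sx sy nx ny j)
      = (PySem.List.pyRange 1 (ny - 1) 1).flatMap (fun j =>
          (PySem.List.pyRange 1 (nx - 1) 1).map (fun i => pvCenter tw th sx sy i j)) := by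
  have hmid : (PySem.List.pyRange 1 (ny - 1) 1).flatMap (fun j => pvRowS tw th sx sy nx ny j)
      = (PySem.List.pyRange 1 (ny - 1) 1).flatMap (fun j =>
          (PySem.List.pyRange 1 (nx - 1) 1).map (fun i => pvCenter tw th sx sy i j)) := by
    apply pvFlatMap_congr
    intro j hj
    rw [PySem.List.mem_pyRange_one] at hj
    exact pvRowS_mid tw th sx sy nx ny j (by omega) (by omega)
  by_cases hy0 : ny ≤ 0
  · have hmidnil : PySem.List.pyRange 1 (ny - 1) 1 = [] := PySem.List.pyRange_one_eq_nil (by omega)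
    rw [PySem.List.pyRange_one_eq_nil hy0, hmidnil]
    simp
  · by_cases hy1 : ny = 1
    · subst hy1
      have hmidnil : PySem.List.pyRange 1 (1 - 1) 1 = [] := PySem.List.pyRange_one_eq_nil (by omega)
      rw [show PySem.List.pyRange 0 1 1 = [0] from PySem.List.pyRange_one_singleton 0, hmidnil]
      simp [pvRowS_edge tw th sx sy nx 1 0 (Or.inl rfl)]
    · rw [PySem.List.pyRange_one_append 0 1 ny (by omega) (by omega),
          PySem.List.pyRange_one_append 1 (ny - 1) ny (by omega) (by omega),
          show PySem.List.pyRange 0 1 1 = [0] from PySem.List.pyRange_one_singleton 0,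
          show PySem.List.pyRange (ny - 1) ny 1 = [ny - 1] by
            have := PySem.List.pyRange_one_singleton (ny - 1); simpa using this]
      simp only [List.flatMap_append, List.flatMap_cons, List.flatMap_nil, List.append_nil, hmid]
      rw [pvRowS_edge tw th sx sy nx ny 0 (Or.inl rfl),
          pvRowS_edge tw th sx sy nx ny (ny - 1) (Or.inr rfl)]
      simp

-- the two structures agree for arbitrary grid parameters
theorem pvGenEq (tw th sx sy nx ny : Int) :
    ((PySem.List.pyRange 0 ny 1).foldl (fun acc j =>
      (PySem.List.pyRange 0 nx 1).foldl (fun acc i =>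
        let x_center := PySem.Int.floordiv tw 2 + i * sx
        let y_center := PySem.Int.floordiv th 2 + j * sy
        let centers := acc.1 ++ [(x_center, y_center)]
        if i = 0 ∨ i = nx - 1 ∨ j = 0 ∨ j = ny - 1 then
          (centers, acc.2.1 ++ [(x_center, y_center)], acc.2.2)
        else
          (centers, acc.2.1, acc.2.2 ++ [(x_center, y_center)])) acc)
      ([], [], []))
    = (let center := fun (i j : Int) =>
         (PySem.Int.floordiv tw 2 + i * sx, PySem.Int.floordiv th 2 + j * sy)
       let row := fun (j : Int) => (PySem.List.pyRange 0 nx 1).map (fun i => center i j)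
       let centers := (PySem.List.pyRange 0 ny 1).flatMap (fun j => row j)
       let bs := (PySem.List.pyRange 1 (ny - 1) 1).foldl (fun acc j =>
           let b1 := if nx ≥ 1 then acc.1 ++ [center 0 j] else acc.1
           let b2 := if nx ≥ 2 then b1 ++ [center (nx - 1) j] else b1
           (b2, acc.2 ++ (PySem.List.pyRange 1 (nx - 1) 1).map (fun i => center i j)))
         ((if ny ≥ 1 then row 0 else []), ([] : List (Int × Int)))
       let border := if ny ≥ 2 then bs.1 ++ row (ny - 1) else bs.1
       (centers, border, bs.2)) := by
  rw [pvA_outer]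
  show _ =
    ((PySem.List.pyRange 0 ny 1).flatMap (fun j => pvRowC tw th sx sy nx j),
     (if ny ≥ 2 then
        ((PySem.List.pyRange 1 (ny - 1) 1).foldl (fun acc j =>
            let b1 := if nx ≥ 1 then acc.1 ++ [pvCenter tw th sx sy 0 j] else acc.1
            let b2 := if nx ≥ 2 then b1 ++ [pvCenter tw th sx sy (nx - 1) j] else b1
            (b2, acc.2 ++ (PySem.List.pyRange 1 (nx - 1) 1).map (fun i => pvCenter tw th sx sy i j)))
          ((if ny ≥ 1 then pvRowC tw th sx sy nx 0 else []), ([] : List (Int × Int)))).1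
        ++ pvRowC tw th sx sy nx (ny - 1)
      else
        ((PySem.List.pyRange 1 (ny - 1) 1).foldl (fun acc j =>
            let b1 := if nx ≥ 1 then acc.1 ++ [pvCenter tw th sx sy 0 j] else acc.1
            let b2 := if nx ≥ 2 then b1 ++ [pvCenter tw th sx sy (nx - 1) j] else b1
            (b2, acc.2 ++ (PySem.List.pyRange 1 (nx - 1) 1).map (fun i => pvCenter tw th sx sy i j)))
          ((if ny ≥ 1 then pvRowC tw th sx sy nx 0 else []), ([] : List (Int × Int)))).1),
     ((PySem.List.pyRange 1 (ny - 1) 1).foldl (fun acc j =>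
         let b1 := if nx ≥ 1 then acc.1 ++ [pvCenter tw th sx sy 0 j] else acc.1
         let b2 := if nx ≥ 2 then b1 ++ [pvCenter tw th sx sy (nx - 1) j] else b1
         (b2, acc.2 ++ (PySem.List.pyRange 1 (nx - 1) 1).map (fun i => pvCenter tw th sx sy i j)))
       ((if ny ≥ 1 then pvRowC tw th sx sy nx 0 else []), ([] : List (Int × Int)))).2)
  rw [pvB_fold (fun i j => pvCenter tw th sx sy i j) nx]
  refine Prod.ext ?_ (Prod.ext ?_ ?_)
  · simp
  · simp only [List.nil_append]
    rw [pvBorder_eq tw th sx sy nx ny]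
    by_cases h2 : ny ≥ 2 <;> simp [h2, List.append_assoc]
  · simp only [List.nil_append]
    rw [pvSalient_eq tw th sx sy nx ny]

-- ===== VERDICT (by name: the statement is the Claim_ definition above) =====
theorem generate_tile_centers_border_and_salient_spec : Claim_equal_generate_tile_centers_border_and_salient := by
  intro fw fh tw th ow oh _ _
  unfold Spec_generate_tile_centers_border_and_salient
    generate_tile_centers_border_and_salient generate_tile_centers_border_and_salient_alt
  exact pvGenEq tw th (pvStepSize fw tw (pvNumTiles fw tw ow)) (pvStepSize fh th (pvNumTiles fh th oh))
    (pvNumTiles fw tw ow) (pvNumTiles fh th oh)
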